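-- pv_equiv track=rewrite | github.com/dhckdtjs/self_algorithm | 백준/Bronze/1934. 최소공배수/최소공배수.py | find
-- ===== SOURCE A (Python) =====
-- def find(num1,num2):
--     res = []
--     if num1 == 1 or num2 == 1:
--         return [1]
--     i=2
--     temp = min(num1,num2)
--     while i <=temp:
--         if num1 % i == 0 and num2 % i == 0:
--             num1 = num1//i
--             num2 = num2//i
--             res.append(i)
--             i=2
--             if num1 == 1 or num2 == 1:
--                 return res
--         else:
--             i+=1
--     return res
-- ===== SOURCE B (Python) =====
-- def find(num1, num2):
--     if num1 == 1 or num2 == 1: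
--         return [1]
--     if num1 < 2 or num2 < 2:
--         return []
--     # Euclid's algorithm for the gcd
--     a, b = num1, num2
--     while b:
--         a, b = b, a % b
--     g = a
--     # trial-divide the gcd up to its square root
--     res = []
--     d = 2
--     while d * d <= g:
--         if g % d == 0:
--             res.append(d)
--             g //= d
--         else:
--             d += 1
--     if g > 1:
--         res.append(g)
--     return res
-- ===== Notes on version B (the rewrite author's own statement) =====
-- stated objective: faster
-- what changed: Replaces A's restart-from-2 common-divisor extraction (which rescans 2..min after every division) by Euclid's gcd followed by a single trial-division factorization of the gcd up to its square root.
import Mathlib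
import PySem

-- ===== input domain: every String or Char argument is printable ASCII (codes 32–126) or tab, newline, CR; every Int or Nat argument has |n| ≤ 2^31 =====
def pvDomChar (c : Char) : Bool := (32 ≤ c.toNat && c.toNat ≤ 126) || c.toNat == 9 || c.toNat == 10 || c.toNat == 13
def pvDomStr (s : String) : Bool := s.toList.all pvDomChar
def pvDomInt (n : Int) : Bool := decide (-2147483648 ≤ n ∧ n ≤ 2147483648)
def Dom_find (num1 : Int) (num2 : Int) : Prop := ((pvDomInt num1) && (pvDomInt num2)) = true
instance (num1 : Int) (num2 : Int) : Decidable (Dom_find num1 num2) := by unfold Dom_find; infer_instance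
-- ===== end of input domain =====

-- B replaces A's restart-from-2 common-divisor extraction by Euclid's gcd followed by
-- trial division of the gcd up to its square root (objective: faster).

-- ===== PORT A =====
-- A's while-loop as a fueled recursion; the fuel is only a termination guard
-- (proved sufficient in pv_loopA below), each step mirrors A's loop body.
def findLoopA : Nat → Int → Int → Int → Int → List Int → List Int
  | 0, _, _, _, _, res => res
  | fuel+1, num1, num2, temp, i, res =>
    if i ≤ temp then
      if PySem.Int.mod num1 i = 0 ∧ PySem.Int.mod num2 i = 0 then
        if PySem.Int.floordiv num1 i = 1 ∨ PySem.Int.floordiv num2 i = 1 then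
          res ++ [i]
        else
          findLoopA fuel (PySem.Int.floordiv num1 i) (PySem.Int.floordiv num2 i) temp 2 (res ++ [i])
      else
        findLoopA fuel num1 num2 temp (i + 1) res
    else res

def find (num1 : Int) (num2 : Int) : List Int :=
  if num1 = 1 ∨ num2 = 1 then [1]
  else
    findLoopA (((min num1 num2).toNat + 2) * ((num1 + num2).toNat + 2))
      num1 num2 (min num1 num2) 2 []

-- ===== PORT B =====
-- termination measure for the Euclid loop (cited by euclidB's decreasing_by)
theorem pv_mod_natAbs_lt (a b : Int) (hb : ¬ b = 0) :
    (PySem.Int.mod a b).natAbs < b.natAbs := by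
  rcases lt_or_gt_of_ne hb with h | h
  · have h1 := PySem.Int.mod_neg_bounds a h
    omega
  · have h1 := PySem.Int.mod_nonneg a h
    have h2 := PySem.Int.mod_lt a h
    omega

-- Python:  while b: a, b = b, a % b
def euclidB (a : Int) (b : Int) : Int :=
  if hb : b = 0 then a else euclidB b (PySem.Int.mod a b)
  termination_by b.natAbs
  decreasing_by exact pv_mod_natAbs_lt a b hb

-- Python:  while d*d <= g: (divide or step d); returns the final (g, res)
def trialLoopB : Nat → Int → Int → List Int → Int × List Int
  | 0, g, _, res => (g, res)
  | fuel+1, g, d, res =>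
    if d * d ≤ g then
      if PySem.Int.mod g d = 0 then
        trialLoopB fuel (PySem.Int.floordiv g d) d (res ++ [d])
      else
        trialLoopB fuel g (d + 1) res
    else (g, res)

def find_alt (num1 : Int) (num2 : Int) : List Int :=
  if num1 = 1 ∨ num2 = 1 then [1]
  else if num1 < 2 ∨ num2 < 2 then []
  else
    let g := euclidB num1 num2
    let p := trialLoopB (3 * g.toNat + 3) g 2 []
    if 1 < p.1 then p.2 ++ [p.1] else p.2

-- ===== PRECONDITION & SPEC =====
def Spec_find (num1 : Int) (num2 : Int) (out : List Int) : Prop := out = find_alt num1 num2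
instance (num1 : Int) (num2 : Int) (out : List Int) : Decidable (Spec_find num1 num2 out) := by unfold Spec_find; infer_instance

-- ===== CLAIM (what is proved, stated in full; the proofs are below) =====
def Claim_equal_find : Prop := ∀ (num1 : Int) (num2 : Int), Dom_find num1 num2 → Spec_find num1 num2 (find num1 num2)

-- ===== LEMMAS AND PROOFS =====

-- both loops produce ascending prime factor lists; the common reference is Nat.primeFactorsList

theorem pv_factors_cons {g i : Nat} (hg : 2 ≤ g) (hmf : Nat.minFac g = i) :
    Nat.primeFactorsList g = i :: Nat.primeFactorsList (g / i) := by
  obtain ⟨k, hk⟩ : ∃ k, g = k + 2 := ⟨g - 2, by omega⟩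
  subst hk
  rw [Nat.primeFactorsList_add_two, hmf]

-- the invariant "no j ∈ [2, d) divides g, and d ∣ g" pins d as minFac g
theorem pv_minFac_eq {g d : Nat} (hd : 2 ≤ d) (hdvd : d ∣ g) (hg : 2 ≤ g)
    (hless : ∀ j : Nat, 2 ≤ j → j < d → ¬ j ∣ g) : Nat.minFac g = d := by
  have h1 : Nat.minFac g ≤ d := Nat.minFac_le_of_dvd hd hdvd
  have hp : Nat.Prime (Nat.minFac g) := Nat.minFac_prime (by omega)
  have h2 : ¬ Nat.minFac g < d := fun hlt =>
    hless _ hp.two_le hlt (Nat.minFac_dvd g)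
  omega

-- A's loop computes the prime factorization of gcd(a, b)
theorem pv_loopA (fuel : Nat) : ∀ (a b i : Nat) (temp : Int) (res : List Int),
    2 ≤ a → 2 ≤ b → 2 ≤ i →
    ((a : Int) ≤ temp ∨ (b : Int) ≤ temp) →
    (∀ j : Nat, 2 ≤ j → j < i → ¬(j ∣ a ∧ j ∣ b)) →
    (a + b) * (temp.toNat + 1) + (temp.toNat + 1 - i) < fuel →
    findLoopA fuel (a : Int) (b : Int) temp (i : Int) res
      = res ++ (Nat.primeFactorsList (Nat.gcd a b)).map (fun n => (n : Int)) := by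
  induction fuel with
  | zero => intro a b i temp res _ _ _ _ _ hf; omega
  | succ f ih =>
    intro a b i temp res ha hb hi htemp hless hf
    have hgcdpos : 0 < Nat.gcd a b := Nat.gcd_pos_of_pos_left b (by omega)
    simp only [findLoopA]
    by_cases hit : (i : Int) ≤ temp
    · rw [if_pos hit]
      have hbranch : (PySem.Int.mod (a : Int) (i : Int) = 0 ∧ PySem.Int.mod (b : Int) (i : Int) = 0)
          ↔ (i ∣ a ∧ i ∣ b) := by
        rw [PySem.Int.mod_eq_zero_iff_dvd, PySem.Int.mod_eq_zero_iff_dvd,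
          Int.natCast_dvd_natCast, Int.natCast_dvd_natCast]
      by_cases hdvd : i ∣ a ∧ i ∣ b
      · rw [if_pos (hbranch.mpr hdvd)]
        rw [PySem.Int.floordiv_natCast a i, PySem.Int.floordiv_natCast b i]
        have hia : i ∣ Nat.gcd a b := Nat.dvd_gcd hdvd.1 hdvd.2
        have hg2 : 2 ≤ Nat.gcd a b := le_trans hi (Nat.le_of_dvd hgcdpos hia)
        have hmf : Nat.minFac (Nat.gcd a b) = i :=
          pv_minFac_eq hi hia hg2 (fun j h2j hji hjg =>
            hless j h2j hji ⟨hjg.trans (Nat.gcd_dvd_left a b), hjg.trans (Nat.gcd_dvd_right a b)⟩)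
        have hfact := pv_factors_cons hg2 hmf
        have hgq : Nat.gcd (a / i) (b / i) = Nat.gcd a b / i := by
          have hmul : Nat.gcd (a / i) (b / i) * i = Nat.gcd a b := by
            conv_rhs => rw [← Nat.div_mul_cancel hdvd.1, ← Nat.div_mul_cancel hdvd.2]
            exact (Nat.gcd_mul_right (a / i) i (b / i)).symm
          rw [← hmul, Nat.mul_div_cancel _ (by omega : 0 < i)]
        have hai1 : 1 ≤ a / i := (Nat.le_div_iff_mul_le (by omega : 0 < i)).mpr
          (by simpa using Nat.le_of_dvd (by omega) hdvd.1)
        have hbi1 : 1 ≤ b / i := (Nat.le_div_iff_mul_le (by omega : 0 < i)).mpr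
          (by simpa using Nat.le_of_dvd (by omega) hdvd.2)
        by_cases hone : a / i = 1 ∨ b / i = 1
        · have hcast : ((a / i : Nat) : Int) = 1 ∨ ((b / i : Nat) : Int) = 1 := by
            rcases hone with h | h <;> [left; right] <;> exact_mod_cast h
          rw [if_pos hcast]
          have hq1 : Nat.gcd a b / i = 1 := by
            rw [← hgq]
            rcases hone with h | h
            · rw [h, Nat.gcd_one_left]
            · rw [h, Nat.gcd_one_right]
          rw [hfact, hq1]
          simp
        · push_neg at hone
          have hcast : ¬ (((a / i : Nat) : Int) = 1 ∨ ((b / i : Nat) : Int) = 1) := by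
            push_neg
            exact ⟨by exact_mod_cast hone.1, by exact_mod_cast hone.2⟩
          rw [if_neg hcast]
          have hlta : a / i < a := Nat.div_lt_self (by omega) (by omega)
          have hltb : b / i < b := Nat.div_lt_self (by omega) (by omega)
          have hrec := ih (a / i) (b / i) 2 temp (res ++ [(i : Int)])
            (by omega) (by omega) le_rfl
            (by rcases htemp with h | h
                · left; have : ((a / i : Nat) : Int) ≤ (a : Int) := by exact_mod_cast hlta.le
                  omega
                · right; have : ((b / i : Nat) : Int) ≤ (b : Int) := by exact_mod_cast hltb.le
                  omega)
            (by intro j hj1 hj2; omega)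
            (by
              have hA : a / i + b / i + 2 ≤ a + b := by omega
              have hmul2 : (a / i + b / i + 2) * (temp.toNat + 1) ≤ (a + b) * (temp.toNat + 1) :=
                Nat.mul_le_mul_right _ hA
              have hexp : (a / i + b / i + 2) * (temp.toNat + 1)
                  = (a / i + b / i) * (temp.toNat + 1) + 2 * temp.toNat + 2 := by ring
              omega)
          rw [show ((2 : Nat) : Int) = (2 : Int) by norm_num] at hrec
          rw [hrec, hfact, hgq]
          simp
      · rw [if_neg (fun hc => hdvd (hbranch.mp hc))]
        have hiT : i ≤ temp.toNat := by omega
        have hrec := ih a b (i + 1) temp res ha hb (by omega) htemp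
          (by intro j hj1 hj2
              rcases Nat.lt_or_ge j i with h | h
              · exact hless j hj1 h
              · have : j = i := by omega
                subst this; exact hdvd)
          (by omega)
        rw [show ((i : Nat) : Int) + 1 = (((i + 1 : Nat)) : Int) by push_cast; ring]
        exact hrec
    · rw [if_neg hit]
      have hg1 : Nat.gcd a b = 1 := by
        by_contra hne
        have hg2 : 2 ≤ Nat.gcd a b := by omega
        have hp : Nat.Prime (Nat.minFac (Nat.gcd a b)) := Nat.minFac_prime (by omega)
        have hda : Nat.minFac (Nat.gcd a b) ∣ a :=
          (Nat.minFac_dvd _).trans (Nat.gcd_dvd_left a b)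
        have hdb : Nat.minFac (Nat.gcd a b) ∣ b :=
          (Nat.minFac_dvd _).trans (Nat.gcd_dvd_right a b)
        have hlea : Nat.minFac (Nat.gcd a b) ≤ a := Nat.le_of_dvd (by omega) hda
        have hleb : Nat.minFac (Nat.gcd a b) ≤ b := Nat.le_of_dvd (by omega) hdb
        have hlt : Nat.minFac (Nat.gcd a b) < i := by
          rcases htemp with h | h <;> omega
        exact hless _ hp.two_le hlt ⟨hda, hdb⟩
      rw [hg1, Nat.primeFactorsList_one]
      simp

-- B's trial division (plus the final leftover append) factors g
theorem pv_trialB (fuel : Nat) : ∀ (g d : Nat) (res : List Int),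
    1 ≤ g → 2 ≤ d →
    (∀ j : Nat, 2 ≤ j → j < d → ¬ j ∣ g) →
    2 * g + (g - d) < fuel →
    (if 1 < (trialLoopB fuel (g : Int) (d : Int) res).1
      then (trialLoopB fuel (g : Int) (d : Int) res).2 ++ [(trialLoopB fuel (g : Int) (d : Int) res).1]
      else (trialLoopB fuel (g : Int) (d : Int) res).2)
      = res ++ (Nat.primeFactorsList g).map (fun n => (n : Int)) := by
  induction fuel with
  | zero => intro g d res _ _ _ hf; omega
  | succ f ih =>
    intro g d res hg hd hless hf
    by_cases hdd : (d : Int) * (d : Int) ≤ (g : Int)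
    · have hddN : d * d ≤ g := by exact_mod_cast hdd
      have h2d : 2 * d ≤ d * d := Nat.mul_le_mul_right d hd
      have hg4 : 4 ≤ g := le_trans (by omega) hddN
      by_cases hdvd : d ∣ g
      · have hc : PySem.Int.mod (g : Int) (d : Int) = 0 := by
          rw [PySem.Int.mod_eq_zero_iff_dvd, Int.natCast_dvd_natCast]; exact hdvd
        have hstep : trialLoopB (f + 1) (g : Int) (d : Int) res
            = trialLoopB f ((g / d : Nat) : Int) (d : Int) (res ++ [(d : Int)]) := by
          simp only [trialLoopB]
          rw [if_pos hdd, if_pos hc, PySem.Int.floordiv_natCast]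
        rw [hstep]
        have hmf : Nat.minFac g = d := pv_minFac_eq hd hdvd (by omega) hless
        have hq1 : 1 ≤ g / d := (Nat.le_div_iff_mul_le (by omega : 0 < d)).mpr (by omega)
        have hq2 : g / d ≤ g / 2 := Nat.div_le_div_left hd (by omega)
        have hrec := ih (g / d) d (res ++ [(d : Int)]) hq1 hd
          (by intro j hj1 hj2 hjdvd
              exact hless j hj1 hj2 (hjdvd.trans ⟨d, (Nat.div_mul_cancel hdvd).symm⟩))
          (by omega)
        rw [hrec, pv_factors_cons (by omega) hmf]
        simp
      · have hc : ¬ PySem.Int.mod (g : Int) (d : Int) = 0 := by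
          rw [PySem.Int.mod_eq_zero_iff_dvd, Int.natCast_dvd_natCast]; exact hdvd
        have hstep : trialLoopB (f + 1) (g : Int) (d : Int) res
            = trialLoopB f (g : Int) (((d + 1 : Nat)) : Int) res := by
          simp only [trialLoopB]
          rw [if_pos hdd, if_neg hc]
          norm_num
        rw [hstep]
        exact ih g (d + 1) res hg (by omega)
          (by intro j hj1 hj2
              rcases Nat.lt_or_ge j d with h | h
              · exact hless j hj1 h
              · have : j = d := by omega
                subst this; exact hdvd)
          (by omega)
    · have hstep : trialLoopB (f + 1) (g : Int) (d : Int) res = ((g : Int), res) := by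
        simp only [trialLoopB]
        rw [if_neg hdd]
      rw [hstep]
      have hddN : g < d * d := by
        have : ¬ d * d ≤ g := fun h => hdd (by exact_mod_cast h)
        omega
      rcases Nat.lt_or_ge 1 g with hg2 | hg1'
      · have hp : Nat.Prime g := by
          rw [Nat.prime_def_le_sqrt]
          refine ⟨hg2, fun m hm2 hmsq hmdvd => ?_⟩
          have hmm : m * m ≤ g := Nat.le_sqrt.mp hmsq
          have hmd : ¬ m < d := fun h => hless m hm2 h hmdvd
          have h2d : 2 * d ≤ d * d := Nat.mul_le_mul_right d hd
          have : d * d ≤ m * m := Nat.mul_le_mul (by omega) (by omega)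
          omega
        rw [Nat.primeFactorsList_prime hp]
        rw [if_pos (show (1 : Int) < ((g : Nat) : Int) by exact_mod_cast hg2)]
        simp
      · have hg1 : g = 1 := by omega
        subst hg1
        rw [if_neg (by norm_num), Nat.primeFactorsList_one]
        simp

-- Euclid's loop computes the gcd (nonnegative arguments)
theorem pv_euclidB (n : Nat) : ∀ (a b : Int), b.natAbs ≤ n → 0 ≤ a → 0 ≤ b →
    euclidB a b = ((Int.gcd a b : Nat) : Int) := by
  induction n with
  | zero =>
    intro a b hn ha hb
    have hb0 : b = 0 := by omega
    rw [euclidB]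
    simp only [hb0, dif_pos]
    simp [Int.gcd, Int.natAbs_of_nonneg ha]
  | succ n ih =>
    intro a b hn ha hb
    rw [euclidB]
    by_cases hb0 : b = 0
    · simp only [hb0, dif_pos]
      simp [Int.gcd, Int.natAbs_of_nonneg ha]
    · rw [dif_neg hb0]
      have hbpos : 0 < b := lt_of_le_of_ne hb (Ne.symm hb0)
      rw [PySem.Int.mod_eq_emod_of_pos hbpos]
      have hmn : 0 ≤ a % b := Int.emod_nonneg a hb0
      have hml : a % b < b := Int.emod_lt_of_pos a hbpos
      have := ih b (a % b) (by omega) hb hmn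
      rw [this]
      congr 1
      have hA : a = ((a.toNat : Nat) : Int) := (Int.toNat_of_nonneg ha).symm
      have hB : b = ((b.toNat : Nat) : Int) := (Int.toNat_of_nonneg hb).symm
      rw [hA, hB, ← Int.natCast_mod]
      simp only [Int.gcd_def, Int.natAbs_natCast]
      calc Nat.gcd b.toNat (a.toNat % b.toNat)
          = Nat.gcd (a.toNat % b.toNat) b.toNat := Nat.gcd_comm _ _
        _ = Nat.gcd b.toNat a.toNat := (Nat.gcd_rec b.toNat a.toNat).symm
        _ = Nat.gcd a.toNat b.toNat := Nat.gcd_comm _ _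

-- assembling: both programs return the factor list of gcd(num1, num2)
theorem pv_main (num1 num2 : Int) : find num1 num2 = find_alt num1 num2 := by
  unfold find find_alt
  by_cases h1 : num1 = 1 ∨ num2 = 1
  · rw [if_pos h1, if_pos h1]
  rw [if_neg h1, if_neg h1]
  by_cases h2 : num1 < 2 ∨ num2 < 2
  · rw [if_pos h2]
    have htemp : min num1 num2 < 2 := by rcases h2 with h | h <;> omega
    have hpos : 0 < ((min num1 num2).toNat + 2) * ((num1 + num2).toNat + 2) := by positivity
    obtain ⟨fl, hfl⟩ : ∃ fl, ((min num1 num2).toNat + 2) * ((num1 + num2).toNat + 2) = fl + 1 :=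
      ⟨((min num1 num2).toNat + 2) * ((num1 + num2).toNat + 2) - 1, by omega⟩
    rw [hfl]
    simp only [findLoopA]
    rw [if_neg (by omega)]
  · rw [if_neg h2]
    push_neg at h2
    obtain ⟨ha, hb⟩ := h2
    -- B side: the Euclid loop returns the gcd
    have hg : euclidB num1 num2 = ((Int.gcd num1 num2 : Nat) : Int) :=
      pv_euclidB num2.natAbs num1 num2 le_rfl (by omega) (by omega)
    have hGpos : 1 ≤ Int.gcd num1 num2 := by
      have : 0 < Nat.gcd num1.natAbs num2.natAbs :=
        Nat.gcd_pos_of_pos_left _ (by omega)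
      exact this
    -- A side
    have hc1 : ((num1.toNat : Nat) : Int) = num1 := Int.toNat_of_nonneg (by omega)
    have hc2 : ((num2.toNat : Nat) : Int) = num2 := Int.toNat_of_nonneg (by omega)
    have hA := pv_loopA (((min num1 num2).toNat + 2) * ((num1 + num2).toNat + 2))
      num1.toNat num2.toNat 2 (min num1 num2) []
      (by omega) (by omega) le_rfl
      (by rw [hc1, hc2]; omega)
      (by intro j hj1 hj2; omega)
      (by
        have hs : (num1 + num2).toNat = num1.toNat + num2.toNat := by omega
        rw [hs]
        have hexp : ((min num1 num2).toNat + 2) * ((num1.toNat + num2.toNat) + 2)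
            = (num1.toNat + num2.toNat) * ((min num1 num2).toNat + 1)
              + (num1.toNat + num2.toNat) + 2 * (min num1 num2).toNat + 4 := by ring
        omega)
    rw [hc1, hc2, show ((2 : Nat) : Int) = (2 : Int) by norm_num] at hA
    have hgcdeq : Nat.gcd num1.toNat num2.toNat = Int.gcd num1 num2 := by
      have e1 : num1.toNat = num1.natAbs := by omega
      have e2 : num2.toNat = num2.natAbs := by omega
      rw [e1, e2]; rfl
    rw [hgcdeq] at hA
    rw [hA]
    -- B side: trial division of the gcd
    simp only [hg, Int.toNat_natCast]
    have hB := pv_trialB (3 * Int.gcd num1 num2 + 3) (Int.gcd num1 num2) 2 []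
      hGpos le_rfl
      (by intro j hj1 hj2; omega)
      (by omega)
    rw [show ((2 : Nat) : Int) = (2 : Int) by norm_num] at hB
    simpa using hB.symm

-- ===== VERDICT (by name: the statement is the Claim_ definition above) =====
theorem find_spec : Claim_equal_find := by
  intro num1 num2 _
  unfold Spec_find
  exact pv_main num1 num2
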